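-- pv_equiv track=rewrite | github.com/okmikaelaok/Reachy1_Simulator | Assets/ReachyControlApp/LocalVoiceAgent/local_voice_agent_sidecar.py | _extract_ready_segment
-- ===== SOURCE A (Python) =====
-- def _extract_ready_segment(buffer: str, final: bool) -> tuple[str, str]:
--     text = str(buffer or "")
--     if not text:
--         return "", ""
--
--     if final:
--         return text.strip(), ""
--
--     candidate_break = -1
--     for idx, ch in enumerate(text):
--         if ch == "\n":
--             candidate_break = idx + 1
--         elif ch in ".!?":
--             if idx + 1 >= len(text) or text[idx + 1].isspace():
--                 candidate_break = idx + 1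
--         elif ch in ";:" and idx >= 18:
--             candidate_break = idx + 1
--         elif ch == "," and idx >= 64:
--             candidate_break = idx + 1
--
--     if candidate_break > 0:
--         return text[:candidate_break].strip(), text[candidate_break:].lstrip()
--
--     if len(text) >= 120:
--         split_at = text.rfind(" ", 40, 120)
--         if split_at > 0:
--             return text[:split_at].strip(), text[split_at + 1:].lstrip()
--
--     return "", text
-- ===== SOURCE B (Python) =====
-- def _extract_ready_segment(buffer: str, final: bool) -> tuple[str, str]:
--     text = str(buffer or "")
--     if not text:
--         return "", ""
--
--     if final:
--         return text.strip(), ""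
--
--     n = len(text)
--     # scan backwards: the first break index found is the last one A's forward scan keeps
--     for idx in range(n - 1, -1, -1):
--         ch = text[idx]
--         if (ch == "\n"
--                 or (ch in ".!?" and (idx + 1 >= n or text[idx + 1].isspace()))
--                 or (ch in ";:" and idx >= 18)
--                 or (ch == "," and idx >= 64)):
--             cut = idx + 1
--             return text[:cut].strip(), text[cut:].lstrip()
--
--     if n >= 120:
--         split_at = text.rfind(" ", 40, 120)
--         if split_at > 0:
--             return text[:split_at].strip(), text[split_at + 1:].lstrip()
--
--     return "", text
-- ===== Notes on version B (the rewrite author's own statement) =====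
-- stated objective: alternative
-- what changed: Replaced A's forward scan that keeps overwriting the last candidate break with a backward scan that returns at the first break index found (= A's last), keeping the same break predicates and the rfind fallback.
import Mathlib
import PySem

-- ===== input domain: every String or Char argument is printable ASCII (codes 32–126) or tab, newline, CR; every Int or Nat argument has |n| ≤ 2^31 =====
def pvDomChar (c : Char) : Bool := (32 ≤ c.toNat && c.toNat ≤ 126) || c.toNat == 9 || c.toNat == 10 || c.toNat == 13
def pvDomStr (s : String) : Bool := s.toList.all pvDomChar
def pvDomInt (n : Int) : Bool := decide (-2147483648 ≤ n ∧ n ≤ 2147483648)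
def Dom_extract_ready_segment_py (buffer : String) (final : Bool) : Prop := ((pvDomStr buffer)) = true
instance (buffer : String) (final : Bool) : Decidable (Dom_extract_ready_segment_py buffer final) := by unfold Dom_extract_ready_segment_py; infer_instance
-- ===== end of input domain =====

-- B replaces A's forward scan (which keeps overwriting the last break candidate) by a
-- backward scan that returns at the first break index found; same predicates, same fallback.

-- ===== PORT A =====
-- the body of A's `for idx, ch in enumerate(text)` loop, elif chain verbatim
-- (text[idx + 1] is guarded in-range by the preceding `idx + 1 >= len(text)` disjunct,
--  so Option.elim false over pyGet? is exact)
def pvStepA (cs : List Char) (cb : Int) (p : Int × Char) : Int :=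
  if p.2 = '\n' then p.1 + 1
  else if p.2 = '.' ∨ p.2 = '!' ∨ p.2 = '?' then
    (if p.1 + 1 ≥ (cs.length : Int) ∨
        (PySem.List.pyGet? cs (p.1 + 1)).elim false PySem.Chars.isspace
     then p.1 + 1 else cb)
  else if (p.2 = ';' ∨ p.2 = ':') ∧ (18 : Int) ≤ p.1 then p.1 + 1
  else if p.2 = ',' ∧ (64 : Int) ≤ p.1 then p.1 + 1
  else cb

def extract_ready_segment_py (buffer : String) (final : Bool) : String × String :=
  let text := buffer.toList          -- str(buffer or "") = buffer for a str argument
  if text = [] then ("", "")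
  else if final then (String.ofList (PySem.Chars.strip text), "")
  else
    let cb := (PySem.List.enumerate text).foldl (pvStepA text) (-1)
    if cb > 0 then
      (String.ofList (PySem.Chars.strip (PySem.List.slice text none (some cb))),
       String.ofList (PySem.Chars.lstrip (PySem.List.slice text (some cb) none)))
    else if 120 ≤ text.length then
      let split_at := PySem.Chars.rfindFrom text [' '] 40 (some 120)
      if split_at > 0 then
        (String.ofList (PySem.Chars.strip (PySem.List.slice text none (some split_at))),
         String.ofList (PySem.Chars.lstrip (PySem.List.slice text (some (split_at + 1)) none)))
      else ("", String.ofList text)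
    else ("", String.ofList text)

-- ===== PORT B =====
-- break predicate at index k (k < cs.length when called)
def pvBreakAt (cs : List Char) (k : Nat) : Bool :=
  let c := cs.getD k ' '
  c == '\n' ||
  ((c == '.' || c == '!' || c == '?') &&
     (decide (cs.length ≤ k + 1) || PySem.Chars.isspace (cs.getD (k + 1) ' '))) ||
  ((c == ';' || c == ':') && decide (18 ≤ k)) ||
  (c == ',' && decide (64 ≤ k))

-- B's `for idx in range(n - 1, -1, -1)` loop: try index k-1, then k-2, …
def pvFindBreak (cs : List Char) : Nat → Option Nat
  | 0 => none
  | k + 1 => if pvBreakAt cs k then some k else pvFindBreak cs k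

def extract_ready_segment_py_alt (buffer : String) (final : Bool) : String × String :=
  let text := buffer.toList          -- str(buffer or "") = buffer for a str argument
  if text = [] then ("", "")
  else if final then (String.ofList (PySem.Chars.strip text), "")
  else
    match pvFindBreak text text.length with
    | some k =>
      (String.ofList (PySem.Chars.strip (text.take (k + 1))),
       String.ofList (PySem.Chars.lstrip (text.drop (k + 1))))
    | none =>
      if 120 ≤ text.length then
        let split_at := PySem.Chars.rfindFrom text [' '] 40 (some 120)
        if split_at > 0 then
          (String.ofList (PySem.Chars.strip (PySem.List.slice text none (some split_at))),
           String.ofList (PySem.Chars.lstrip (PySem.List.slice text (some (split_at + 1)) none)))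
        else ("", String.ofList text)
      else ("", String.ofList text)

-- ===== PRECONDITION & SPEC =====
def Spec_extract_ready_segment_py (buffer : String) (final : Bool) (out : String × String) : Prop := out = extract_ready_segment_py_alt buffer final
instance (buffer : String) (final : Bool) (out : String × String) : Decidable (Spec_extract_ready_segment_py buffer final out) := by unfold Spec_extract_ready_segment_py; infer_instance

-- ===== CLAIM (what is proved, stated in full; the proofs are below) =====
def Claim_equal_extract_ready_segment_py : Prop := ∀ (buffer : String) (final : Bool), Dom_extract_ready_segment_py buffer final → Spec_extract_ready_segment_py buffer final (extract_ready_segment_py buffer final)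

-- ===== LEMMAS AND PROOFS =====

-- A's step as a plain "if predicate then idx+1 else acc"
def pvQA (cs : List Char) (p : Int × Char) : Bool :=
  (p.2 == '\n') ||
  ((p.2 == '.' || p.2 == '!' || p.2 == '?') &&
     (decide (p.1 + 1 ≥ (cs.length : Int)) ||
      (PySem.List.pyGet? cs (p.1 + 1)).elim false PySem.Chars.isspace)) ||
  ((p.2 == ';' || p.2 == ':') && decide ((18 : Int) ≤ p.1)) ||
  ((p.2 == ',') && decide ((64 : Int) ≤ p.1))

lemma pvStepA_eq (cs : List Char) (cb : Int) (p : Int × Char) :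
    pvStepA cs cb p = if pvQA cs p then p.1 + 1 else cb := by
  obtain ⟨i, c⟩ := p
  by_cases h : c = '\n' ∨ c = '.' ∨ c = '!' ∨ c = '?' ∨ c = ';' ∨ c = ':' ∨ c = ','
  · rcases h with rfl | rfl | rfl | rfl | rfl | rfl | rfl <;>
      simp only [pvStepA, pvQA] <;> split_ifs <;> simp_all <;> omega
  · push Not at h
    obtain ⟨h1, h2, h3, h4, h5, h6, h7⟩ := h
    simp [pvStepA, pvQA, h1, h2, h3, h4, h5, h6, h7]

-- "last kept candidate" of a forward fold = getLast? of the filter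
lemma foldl_lastFilter {α β : Type} (q : α → Bool) (g : α → β) (a : β) (l : List α) :
    l.foldl (fun acc x => if q x then g x else acc) a = ((l.filter q).getLast?).elim a g := by
  induction l generalizing a with
  | nil => simp
  | cons x xs ih =>
    simp only [List.foldl_cons, ih, List.filter_cons]
    by_cases hx : q x
    · simp only [hx, if_pos]
      cases hfq : xs.filter q with
      | nil => simp
      | cons y l =>
        rw [List.getLast?_cons_cons]
        cases hyl : (y :: l).getLast? with
        | none => simp at hyl
        | some z => simp
    · simp [hx]

-- B's backward scan finds the LAST index of range n satisfying the predicate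
lemma pvFindBreak_eq (cs : List Char) (n : Nat) :
    pvFindBreak cs n = ((List.range n).filter (pvBreakAt cs)).getLast? := by
  induction n with
  | zero => simp [pvFindBreak]
  | succ k ih =>
    simp only [pvFindBreak, List.range_succ, List.filter_append, List.filter_cons,
      List.filter_nil]
    by_cases hk : pvBreakAt cs k
    · simp [hk]
    · simp [hk, ih]

-- the two predicates agree on in-range indices
lemma pvQA_eq_pvBreakAt (cs : List Char) (k : Nat) (hk : k < cs.length) :
    pvQA cs ((k : Int), PySem.List.pyGetD cs (k : Int) ' ') = pvBreakAt cs k := by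
  have hdec : decide ((k : Int) + 1 ≥ (cs.length : Int)) = decide (cs.length ≤ k + 1) := by
    simp only [decide_eq_decide]; omega
  have hdec18 : decide ((18 : Int) ≤ (k : Int)) = decide (18 ≤ k) := by
    simp only [decide_eq_decide]; omega
  have hdec64 : decide ((64 : Int) ≤ (k : Int)) = decide (64 ≤ k) := by
    simp only [decide_eq_decide]; omega
  simp only [pvQA, pvBreakAt, PySem.List.pyGetD_natCast, hdec, hdec18, hdec64]
  by_cases hlt : k + 1 < cs.length
  · have hsome : PySem.List.pyGet? cs ((k : Int) + 1) = some cs[k + 1] := by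
      have h1 : ((k : Int) + 1) = ((k + 1 : Nat) : Int) := by push_cast; ring
      rw [h1, PySem.List.pyGet?_natCast]; exact List.getElem?_eq_getElem hlt
    have hg : cs.getD (k + 1) ' ' = cs[k + 1] := List.getD_eq_getElem cs ' ' hlt
    rw [hsome, hg]
    rfl
  · have hle : decide (cs.length ≤ k + 1) = true := decide_eq_true (by omega)
    simp [hle]

-- A's whole loop computes B's backward search result (+1, or -1 when none)
lemma pvLoop_eq (cs : List Char) :
    (PySem.List.enumerate cs).foldl (pvStepA cs) (-1)
      = (pvFindBreak cs cs.length).elim (-1) (fun k => (k : Int) + 1) := by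
  have hstep : pvStepA cs = fun acc x => if pvQA cs x then x.1 + 1 else acc := by
    funext cb p; exact pvStepA_eq cs cb p
  rw [hstep, foldl_lastFilter (pvQA cs) (fun p => p.1 + 1) (-1)]
  rw [PySem.List.enumerate_eq_map_pyRange cs ' ']
  have hlen : PySem.List.len cs = (cs.length : Int) := by simp [PySem.List.len]
  rw [hlen, PySem.List.pyRange_zero_natCast, List.map_map, List.filter_map,
    List.getLast?_map]
  have hfc : (List.range cs.length).filter
        (pvQA cs ∘ ((fun j => (j, PySem.List.pyGetD cs j ' ')) ∘ fun (k : Nat) => (k : Int)))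
      = (List.range cs.length).filter (pvBreakAt cs) := by
    apply List.filter_congr
    intro k hk
    rw [List.mem_range] at hk
    exact pvQA_eq_pvBreakAt cs k hk
  rw [hfc, pvFindBreak_eq cs cs.length]
  cases ((List.range cs.length).filter (pvBreakAt cs)).getLast? <;> simp

-- ===== VERDICT (by name: the statement is the Claim_ definition above) =====
theorem extract_ready_segment_py_spec : Claim_equal_extract_ready_segment_py := by
  intro buffer final _
  unfold Spec_extract_ready_segment_py extract_ready_segment_py extract_ready_segment_py_alt
  by_cases hnil : buffer.toList = []
  · simp [hnil]
  · simp only [hnil, if_false]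
    by_cases hf : final = true
    · simp [hf]
    · simp only [hf, Bool.false_eq_true, if_false]
      rw [pvLoop_eq buffer.toList]
      cases hfb : pvFindBreak buffer.toList buffer.toList.length with
      | none => simp
      | some k =>
        simp only [Option.elim]
        have hpos : ((k : Int) + 1) > 0 := by positivity
        rw [if_pos hpos]
        have h1 : ((k : Int) + 1) = ((k + 1 : Nat) : Int) := by push_cast; ring
        rw [h1, PySem.List.slice_to_natCast, PySem.List.slice_from_natCast]
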